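-- pv_equiv track=rewrite | github.com/pesqair/meshcore-weather | meshcore_weather/parser/pfm.py | _find_column_positions
-- ===== SOURCE A (Python) =====
-- def _find_column_positions(hrly_line: str, label_end: int) -> list[int]:
--     """Return the start column of each time slot in a "<tz> 3hrly" header row.
--
--     Data rows below this header place their values at the same columns.
--     Each value is right-aligned in a 3-char-wide slot (2 chars value + space).
--     We scan the hours field and record every non-space run.
--     """
--     positions: list[int] = []
--     i = label_end
--     while i < len(hrly_line):
--         if hrly_line[i] != " ":
--             # Start of a value; record and skip to next space
--             positions.append(i)
--             while i < len(hrly_line) and hrly_line[i] != " ":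
--                 i += 1
--         else:
--             i += 1
--     return positions
-- ===== SOURCE B (Python) =====
-- def _find_column_positions(hrly_line: str, label_end: int) -> list[int]:
--     """Single pass with a previous-character state instead of nested index loops."""
--     positions = []
--     prev = " "
--     for i in range(label_end, len(hrly_line)):
--         c = hrly_line[i]
--         if c != " " and prev == " ":
--             positions.append(i)
--         prev = c
--     return positions
-- ===== Notes on version B (the rewrite author's own statement) =====
-- stated objective: simpler
-- what changed: Replaced A's nested while-loops with manual index walking (outer scan plus inner skip-to-space loop) by a single for-loop pass that keeps only the previous character as state and records i exactly at run starts.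
import Mathlib
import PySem

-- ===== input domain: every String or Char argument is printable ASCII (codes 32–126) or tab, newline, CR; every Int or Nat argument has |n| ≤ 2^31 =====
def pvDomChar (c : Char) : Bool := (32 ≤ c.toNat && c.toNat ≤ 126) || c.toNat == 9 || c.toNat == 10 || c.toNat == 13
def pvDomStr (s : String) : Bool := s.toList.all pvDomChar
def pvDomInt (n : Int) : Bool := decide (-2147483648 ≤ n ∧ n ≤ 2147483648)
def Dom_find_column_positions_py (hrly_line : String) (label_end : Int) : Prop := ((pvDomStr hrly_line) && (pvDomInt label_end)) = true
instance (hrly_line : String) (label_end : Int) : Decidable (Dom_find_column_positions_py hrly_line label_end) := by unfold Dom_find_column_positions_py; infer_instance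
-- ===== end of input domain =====

-- B replaces A's nested index-walking while-loops by a single pass that keeps the previous
-- character as state (objective: simpler). Return values agree on every input where A returns.

-- ===== PORT A =====
-- inner 'while i < len(hrly_line) and hrly_line[i] != " ": i += 1'
-- (an out-of-range hrly_line[i] — where the Python raises IndexError — is read as ' ' here;
--  both ports read the same default, so the proved equality is unconditional)
def pvInnerA (s : String) (i : Int) : Int :=
  if _h : i < PySem.Str.len s ∧ (PySem.Str.pyGet? s i).getD ' ' ≠ ' ' then
    pvInnerA s (i + 1)
  else i
termination_by (PySem.Str.len s - i).toNat
decreasing_by omega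

theorem pvInnerA_ge (s : String) (i : Int) : i ≤ pvInnerA s i := by
  unfold pvInnerA
  split
  · exact le_trans (by omega) (pvInnerA_ge s (i + 1))
  · exact le_refl i
termination_by (PySem.Str.len s - i).toNat
decreasing_by omega

theorem pvInnerA_step (s : String) (i : Int)
    (h1 : i < PySem.Str.len s) (h2 : (PySem.Str.pyGet? s i).getD ' ' ≠ ' ') :
    pvInnerA s i = pvInnerA s (i + 1) := by
  conv_lhs => rw [pvInnerA]
  rw [dif_pos ⟨h1, h2⟩]

-- outer 'while i < len(hrly_line): …'
def pvOuterA (s : String) (i : Int) (positions : List Int) : List Int :=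
  if h1 : i < PySem.Str.len s then
    if h2 : (PySem.Str.pyGet? s i).getD ' ' ≠ ' ' then
      -- positions.append(i); then the inner skip loop runs from i
      pvOuterA s (pvInnerA s i) (positions ++ [i])
    else
      pvOuterA s (i + 1) positions
  else positions
termination_by (PySem.Str.len s - i).toNat
decreasing_by
  · have h3 : pvInnerA s i = pvInnerA s (i + 1) := pvInnerA_step s i h1 h2
    have h4 : i + 1 ≤ pvInnerA s (i + 1) := pvInnerA_ge s (i + 1)
    omega
  · omega

def find_column_positions_py (hrly_line : String) (label_end : Int) : List Int :=
  pvOuterA hrly_line label_end []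

-- ===== PORT B =====
-- one step of B's for-loop body: state = (positions, prev); c = hrly_line[i]
def pvStepB (s : String) (st : List Int × Char) (i : Int) : List Int × Char :=
  (if (PySem.Str.pyGet? s i).getD ' ' ≠ ' ' ∧ st.2 = ' ' then st.1 ++ [i] else st.1,
   (PySem.Str.pyGet? s i).getD ' ')

def find_column_positions_py_alt (hrly_line : String) (label_end : Int) : List Int :=
  ((PySem.List.pyRange label_end (PySem.Str.len hrly_line) 1).foldl
    (pvStepB hrly_line) ([], ' ')).1

-- ===== PRECONDITION & SPEC =====
-- Pre_ excludes exactly the inputs where Python A raises IndexError: label_end below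
-- -len(hrly_line) while still < len(hrly_line) (the loop then indexes out of range).
def Pre_find_column_positions_py (hrly_line : String) (label_end : Int) : Prop :=
  -(PySem.Str.len hrly_line) ≤ label_end ∨ PySem.Str.len hrly_line ≤ label_end
instance (hrly_line : String) (label_end : Int) : Decidable (Pre_find_column_positions_py hrly_line label_end) := by unfold Pre_find_column_positions_py; infer_instance
def pvWitness_find_column_positions_py : String × Int := (" ab cd", 1)

def Spec_find_column_positions_py (hrly_line : String) (label_end : Int) (out : List Int) : Prop := out = find_column_positions_py_alt hrly_line label_end
instance (hrly_line : String) (label_end : Int) (out : List Int) : Decidable (Spec_find_column_positions_py hrly_line label_end out) := by unfold Spec_find_column_positions_py; infer_instance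

-- ===== CLAIM (what is proved, stated in full; the proofs are below) =====
def Claim_equal_find_column_positions_py : Prop := ∀ (hrly_line : String) (label_end : Int), Dom_find_column_positions_py hrly_line label_end → Pre_find_column_positions_py hrly_line label_end → Spec_find_column_positions_py hrly_line label_end (find_column_positions_py hrly_line label_end)

-- ===== LEMMAS AND PROOFS =====

theorem pvInnerA_stop (s : String) (i : Int) (h : ¬ i < PySem.Str.len s) :
    pvInnerA s i = i := by
  rw [pvInnerA, dif_neg (fun hh => h hh.1)]

theorem pvInnerA_space (s : String) (i : Int)
    (h : (PySem.Str.pyGet? s i).getD ' ' = ' ') : pvInnerA s i = i := by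
  rw [pvInnerA, dif_neg (fun hh => hh.2 h)]

theorem pvOuterA_stop (s : String) (i : Int) (a : List Int) (h : ¬ i < PySem.Str.len s) :
    pvOuterA s i a = a := by
  rw [pvOuterA, dif_neg h]

theorem pvOuterA_space (s : String) (i : Int) (a : List Int)
    (h1 : i < PySem.Str.len s) (hc : (PySem.Str.pyGet? s i).getD ' ' = ' ') :
    pvOuterA s i a = pvOuterA s (i + 1) a := by
  conv_lhs => rw [pvOuterA]
  rw [dif_pos h1, dif_neg (not_not_intro hc)]

theorem pvOuterA_run (s : String) (i : Int) (a : List Int)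
    (h1 : i < PySem.Str.len s) (hc : (PySem.Str.pyGet? s i).getD ' ' ≠ ' ') :
    pvOuterA s i a = pvOuterA s (pvInnerA s i) (a ++ [i]) := by
  conv_lhs => rw [pvOuterA]
  rw [dif_pos h1, dif_pos hc]

-- main loop correspondence: B's fold from i with previous-char state `prev` equals A's
-- outer loop from i (with the inner skip applied first when `prev` is mid-run).
theorem pv_main (s : String) (n : Nat) (i : Int) (acc : List Int) (prev : Char)
    (hn : (PySem.Str.len s - i).toNat = n) :
    ((PySem.List.pyRange i (PySem.Str.len s) 1).foldl (pvStepB s) (acc, prev)).1 =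
      (if prev = ' ' then pvOuterA s i acc else pvOuterA s (pvInnerA s i) acc) := by
  induction n generalizing i acc prev with
  | zero =>
    have hge : ¬ i < PySem.Str.len s := by omega
    rw [PySem.List.pyRange_one_eq_nil (by omega), List.foldl_nil,
      pvInnerA_stop s i hge, pvOuterA_stop s i acc hge, ite_self]
  | succ m ih =>
    have hlt : i < PySem.Str.len s := by omega
    rw [PySem.List.pyRange_one_cons hlt, List.foldl_cons]
    by_cases hc : (PySem.Str.pyGet? s i).getD ' ' = ' '
    · -- current char is a space: state resets to ' ', A moves on by one
      have hstep : pvStepB s (acc, prev) i = (acc, ' ') := by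
        unfold pvStepB
        rw [if_neg (fun hh => hh.1 hc), hc]
      rw [hstep, ih (i + 1) acc ' ' (by omega), if_pos rfl,
        pvInnerA_space s i hc, pvOuterA_space s i acc hlt hc, ite_self]
    · by_cases hp : prev = ' '
      · -- run start: both record i
        have hstep : pvStepB s (acc, prev) i = (acc ++ [i], (PySem.Str.pyGet? s i).getD ' ') := by
          unfold pvStepB
          rw [if_pos ⟨hc, hp⟩]
        rw [hstep, ih (i + 1) (acc ++ [i]) _ (by omega), if_neg hc, if_pos hp,
          pvOuterA_run s i acc hlt hc, pvInnerA_step s i hlt hc]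
      · -- mid-run: neither records
        have hstep : pvStepB s (acc, prev) i = (acc, (PySem.Str.pyGet? s i).getD ' ') := by
          unfold pvStepB
          rw [if_neg (fun hh => hp hh.2)]
        rw [hstep, ih (i + 1) acc _ (by omega), if_neg hc, if_neg hp,
          pvInnerA_step s i hlt hc]

-- ===== VERDICT (by name: the statement is the Claim_ definition above) =====
theorem find_column_positions_py_spec : Claim_equal_find_column_positions_py := by
  intro s le _ _
  unfold Spec_find_column_positions_py find_column_positions_py find_column_positions_py_alt
  rw [pv_main s (PySem.Str.len s - le).toNat le [] ' ' rfl, if_pos rfl]
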